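-- pv_equiv track=rewrite | github.com/browonkim/cote | 카드모양set.py | solution
-- ===== SOURCE A (Python) =====
-- from itertools import combinations
--
-- def solution(cards):
--     ideal_maximum = len(cards)//3
--     possible_set = set()
--     for card in combinations(cards, 3):
--         num = len({card[0][0], card[1][0], card[2][0]})
--         color = len({card[0][1], card[1][1], card[2][1]})
--         shape = len({card[0][2], card[1][2], card[2][2]})
--         shadow = len({card[0][3], card[1][3], card[2][3]})
--         if num == 1 or num == 3:
--             if color == 1 or color == 3:
--                 if shape == 1 or shape == 3:
--                     if shadow == 1 or shadow == 3:
--                         possible_set.add(card)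
--
--     def dfs(left, n):
--         if len(left) < 3:
--             return n
--         temp_max = n
--         for i in combinations(left, 3):
--             if i in possible_set:
--                 temp = dfs([x for x in left if x not in i], n+1)
--                 if temp == ideal_maximum:
--                     return temp
--                 temp_max = temp if temp > temp_max else temp_max
--         return temp_max
--
--     return dfs(cards, 0)
-- ===== SOURCE B (Python) =====
-- from itertools import combinations
--
-- def solution(cards):
--     # Max number of disjoint valid SET triples, by a DFS that fixes the first
--     # remaining card (skip it, or pair it with each valid later pair) instead of
--     # scanning a precomputed table of all valid triples at every node.
--     ideal = len(cards) // 3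
--
--     def ok(a, b, c):
--         return all(len({a[k], b[k], c[k]}) != 2 for k in range(4))
--
--     def dfs(left, n):
--         if len(left) < 3:
--             return n
--         first, rest = left[0], left[1:]
--         best = dfs(rest, n)                    # branch: leave first unused
--         if best == ideal:
--             return best
--         for a, b in combinations(rest, 2):     # branch: use first in a triple
--             if ok(first, a, b):
--                 t = dfs([x for x in rest if x != a and x != b], n + 1)
--                 if t == ideal:
--                     return t
--                 if t > best:
--                     best = t
--         return best
--
--     return dfs(list(cards), 0)
-- ===== Notes on version B (the rewrite author's own statement) =====
-- stated objective: alternative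
-- what changed: Dropped A's precomputed set of all valid triples and its per-node scan over combinations(left,3); B runs a DFS that fixes the first remaining card and branches on leaving it unused or pairing it with each valid later pair, validating triples inline, keeping the ideal-maximum early exit.
import Mathlib
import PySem

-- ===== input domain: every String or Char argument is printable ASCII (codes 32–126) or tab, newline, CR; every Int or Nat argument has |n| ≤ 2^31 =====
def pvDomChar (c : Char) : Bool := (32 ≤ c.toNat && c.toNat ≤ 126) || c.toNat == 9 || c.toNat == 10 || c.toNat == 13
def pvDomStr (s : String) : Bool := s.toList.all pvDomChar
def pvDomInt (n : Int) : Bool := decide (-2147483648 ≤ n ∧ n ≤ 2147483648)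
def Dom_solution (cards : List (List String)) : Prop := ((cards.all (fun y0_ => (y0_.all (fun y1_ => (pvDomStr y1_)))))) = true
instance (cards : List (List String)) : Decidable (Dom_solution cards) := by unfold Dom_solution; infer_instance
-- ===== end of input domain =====

-- B drops A's precomputed set of all valid triples and runs a first-card-fixed DFS with an
-- inline validity check (objective: alternative). Pre_ excludes inputs where A raises
-- IndexError (a card shorter than 4 when there are >= 3 cards) and the duplicate-card corner.


-- ===== PORT A =====
-- itertools.combinations(xs, 2) / (xs, 3), in itertools order
def combos2 {α : Type} : List α → List (α × α)
  | [] => []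
  | x :: xs => xs.map (fun y => (x, y)) ++ combos2 xs

def combos3 {α : Type} : List α → List (α × α × α)
  | [] => []
  | x :: xs => (combos2 xs).map (fun p => (x, p.1, p.2)) ++ combos3 xs

-- card[k]; under Pre_ every card reached here has length >= 4 (Python raises IndexError
-- otherwise, and Pre_ excludes exactly those inputs), so the default "" is never used
def cardGet (c : List String) (k : Nat) : String := PySem.List.pyGetD c (k : Int) ""

-- the num/color/shape/shadow computation and nested ifs of A's first loop
def validA (t : List String × List String × List String) : Bool :=
  let num := (PySem.Set.ofList [cardGet t.1 0, cardGet t.2.1 0, cardGet t.2.2 0]).length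
  let color := (PySem.Set.ofList [cardGet t.1 1, cardGet t.2.1 1, cardGet t.2.2 1]).length
  let shape := (PySem.Set.ofList [cardGet t.1 2, cardGet t.2.1 2, cardGet t.2.2 2]).length
  let shadow := (PySem.Set.ofList [cardGet t.1 3, cardGet t.2.1 3, cardGet t.2.2 3]).length
  if num = 1 ∨ num = 3 then
    if color = 1 ∨ color = 3 then
      if shape = 1 ∨ shape = 3 then
        if shadow = 1 ∨ shadow = 3 then true else false
      else false
    else false
  else false

-- the 'for i in combinations(left, 3)' loop of A's dfs, with its early return on
-- ideal_maximum; dfs (the recursive call, one fuel level down) is passed as a function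
def goA (ideal : Int) (pset : PySem.Set (List String × List String × List String))
    (dfs : List (List String) → Int → Int) (left : List (List String)) :
    List (List String × List String × List String) → Int → Int → Int
  | [], _, tempMax => tempMax
  | i :: rest, n, tempMax =>
      if pset.contains i then
        let temp := dfs (left.filter (fun x => !(x == i.1 || x == i.2.1 || x == i.2.2))) (n + 1)
        if temp = ideal then temp
        else goA ideal pset dfs left rest n (if temp > tempMax then temp else tempMax)
      else goA ideal pset dfs left rest n tempMax

-- dfs of A; fuel = length of the current list bounds the recursion depth (each recursive
-- call removes the triple's members, so the list shrinks); the fuel-0 branch is unreached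
def dfsA (ideal : Int) (pset : PySem.Set (List String × List String × List String)) :
    Nat → List (List String) → Int → Int
  | 0, _, n => n
  | fuel + 1, left, n =>
      if left.length < 3 then n
      else goA ideal pset (fun l m => dfsA ideal pset fuel l m) left (combos3 left) n n

def solution (cards : List (List String)) : Int :=
  let ideal := PySem.Int.floordiv (cards.length : Int) 3
  let pset := (combos3 cards).foldl
    (fun s card => if validA card then PySem.Set.add s card else s) PySem.Set.empty
  dfsA ideal pset cards.length cards 0

-- ===== PORT B =====
-- ok(a, b, c): every one of the four attributes appears once or three times in the triple
def okB (a b c : List String) : Bool :=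
  (List.range 4).all (fun k =>
    (PySem.Set.ofList [PySem.List.pyGetD a (k : Int) "", PySem.List.pyGetD b (k : Int) "",
      PySem.List.pyGetD c (k : Int) ""]).length ≠ 2)

-- the 'for a, b in combinations(rest, 2)' loop of B's dfs, with its early return on ideal
def goB (ideal : Int) (dfs : List (List String) → Int → Int)
    (rest : List (List String)) (first : List String) :
    List (List String × List String) → Int → Int → Int
  | [], _, best => best
  | (a, b) :: ps, n, best =>
      if okB first a b then
        let t := dfs (rest.filter (fun x => !(x == a || x == b))) (n + 1)
        if t = ideal then t
        else goB ideal dfs rest first ps n (if t > best then t else best)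
      else goB ideal dfs rest first ps n best

-- B's dfs: fix the first card, take the best of leaving it unused and of pairing it with
-- every valid later pair; fuel = length of the current list bounds the recursion depth
def dfsB (ideal : Int) : Nat → List (List String) → Int → Int
  | 0, _, n => n
  | fuel + 1, left, n =>
      if left.length < 3 then n
      else
        match left with
        | [] => n
        | first :: rest =>
            let best := dfsB ideal fuel rest n
            if best = ideal then best
            else goB ideal (fun l m => dfsB ideal fuel l m) rest first (combos2 rest) n best

def solution_alt (cards : List (List String)) : Int :=
  let ideal := PySem.Int.floordiv (cards.length : Int) 3
  dfsB ideal cards.length cards 0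

-- ===== PRECONDITION & SPEC =====
-- Pre_ excludes (i) inputs with >= 3 cards where some card has fewer than 4 entries — there
-- A raises IndexError (color is computed before any check) — and (ii) lists with duplicate
-- cards, a corner outside the SET-game domain where A's remove-all-equal-copies and B's
-- remove-the-chosen-copies are both defensible and can give different counts.
def Pre_solution (cards : List (List String)) : Prop :=
  cards.length < 3 ∨ (cards.Nodup ∧ ∀ c ∈ cards, 4 ≤ c.length)
instance (cards : List (List String)) : Decidable (Pre_solution cards) := by
  unfold Pre_solution; infer_instance

def pvWitness_solution : List (List String) :=
  [["1", "r", "o", "f"], ["2", "g", "o", "f"], ["3", "b", "o", "f"]]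

def Spec_solution (cards : List (List String)) (out : Int) : Prop := out = solution_alt cards
instance (cards : List (List String)) (out : Int) : Decidable (Spec_solution cards out) := by unfold Spec_solution; infer_instance

-- ===== CLAIM (what is proved, stated in full; the proofs are below) =====
def Claim_equal_solution : Prop := ∀ (cards : List (List String)), Dom_solution cards → Pre_solution cards → Spec_solution cards (solution cards)

-- ===== LEMMAS AND PROOFS =====

-- removal of a triple / of a pair, exactly the filters the two dfs bodies build
def rm3 (l : List (List String)) (t : List String × List String × List String) :
    List (List String) :=
  l.filter (fun x => !(x == t.1 || x == t.2.1 || x == t.2.2))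

def rm2 (l : List (List String)) (a b : List String) : List (List String) :=
  l.filter (fun x => !(x == a || x == b))

-- a packing: a set of disjoint valid triples taken from l (in subsequence order), counted
inductive Pack : List (List String) → Nat → Prop
  | zero (l : List (List String)) : Pack l 0
  | step (l : List (List String)) (t : List String × List String × List String) (k : Nat)
      (hv : validA t = true) (hs : [t.1, t.2.1, t.2.2].Sublist l)
      (hp : Pack (rm3 l t) k) : Pack l (k + 1)

def psetOf (cards : List (List String)) :
    PySem.Set (List String × List String × List String) :=
  (combos3 cards).foldl
    (fun s card => if validA card then PySem.Set.add s card else s) PySem.Set.empty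

theorem mem_combos2 {α : Type} (a b : α) (l : List α) :
    (a, b) ∈ combos2 l ↔ [a, b].Sublist l := by
  induction l with
  | nil => simp [combos2]
  | cons x xs ih =>
    simp only [combos2, List.mem_append, List.mem_map, ih, List.sublist_cons_iff]
    constructor
    · rintro (⟨y, hy, heq⟩ | h)
      · injection heq with h1 h2
        subst h1; subst h2
        exact Or.inr ⟨_, rfl, List.singleton_sublist.mpr hy⟩
      · exact Or.inl h
    · rintro (h | ⟨r, heq, hr⟩)
      · exact Or.inr h
      · injection heq with h1 h2
        subst h1; subst h2
        exact Or.inl ⟨b, List.singleton_sublist.mp hr, rfl⟩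

theorem mem_combos3 {α : Type} (a b c : α) (l : List α) :
    (a, b, c) ∈ combos3 l ↔ [a, b, c].Sublist l := by
  induction l with
  | nil => simp [combos3]
  | cons x xs ih =>
    simp only [combos3, List.mem_append, List.mem_map, ih, List.sublist_cons_iff]
    constructor
    · rintro (⟨⟨p1, p2⟩, hp, heq⟩ | h)
      · injection heq with h1 h23
        injection h23 with h2 h3
        subst h1; subst h2; subst h3
        exact Or.inr ⟨_, rfl, (mem_combos2 _ _ _).mp hp⟩
      · exact Or.inl h
    · rintro (h | ⟨r, heq, hr⟩)
      · exact Or.inr h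
      · injection heq with h1 h2
        subst h1; subst h2
        exact Or.inl ⟨(b, c), (mem_combos2 _ _ _).mpr hr, rfl⟩

theorem contains_psetOf (cards : List (List String))
    (t : List String × List String × List String) :
    (psetOf cards).contains t = true ↔ (t ∈ combos3 cards ∧ validA t = true) := by
  have key : ∀ (l : List (List String × List String × List String))
      (acc : PySem.Set (List String × List String × List String)),
      t ∈ l.foldl (fun s c => if validA c then PySem.Set.add s c else s) acc ↔
        t ∈ acc ∨ (t ∈ l ∧ validA t = true) := by
    intro l
    induction l with
    | nil => simp
    | cons c cs ih =>
      intro acc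
      by_cases hc : validA c = true
      · simp only [List.foldl_cons, if_pos hc, ih, PySem.Set.mem_add]
        constructor
        · rintro ((h | rfl) | h)
          · exact Or.inl h
          · exact Or.inr ⟨List.mem_cons_self .., hc⟩
          · exact Or.inr ⟨List.mem_cons_of_mem _ h.1, h.2⟩
        · rintro (h | ⟨hm, hv⟩)
          · exact Or.inl (Or.inl h)
          · rcases List.mem_cons.mp hm with rfl | hm'
            · exact Or.inl (Or.inr rfl)
            · exact Or.inr ⟨hm', hv⟩
      · simp only [List.foldl_cons, if_neg hc, ih]
        constructor
        · rintro (h | h)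
          · exact Or.inl h
          · exact Or.inr ⟨List.mem_cons_of_mem _ h.1, h.2⟩
        · rintro (h | ⟨hm, hv⟩)
          · exact Or.inl h
          · rcases List.mem_cons.mp hm with rfl | hm'
            · exact absurd hv hc
            · exact Or.inr ⟨hm', hv⟩
  have hc : (psetOf cards).contains t = true ↔ t ∈ psetOf cards := by
    simp [PySem.Set.contains]
  rw [hc]
  unfold psetOf
  rw [key]
  simp [PySem.Set.empty]

theorem triLen (x y z : String) : (PySem.Set.ofList [x, y, z]).length = 1 ∨
    (PySem.Set.ofList [x, y, z]).length = 2 ∨ (PySem.Set.ofList [x, y, z]).length = 3 := by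
  by_cases h1 : y = x <;> by_cases h2 : z = x <;> by_cases h3 : z = y <;>
    simp [PySem.Set.ofList, PySem.Set.add, PySem.Set.contains, List.foldl, h1, h2, h3]

theorem okB_eq_validA (a b c : List String) : okB a b c = validA (a, b, c) := by
  unfold okB validA cardGet
  have h4 : List.range 4 = [0, 1, 2, 3] := rfl
  rw [h4]
  simp only [List.all_cons, List.all_nil, Bool.and_true]
  rcases triLen (PySem.List.pyGetD a (0 : Int) "") (PySem.List.pyGetD b (0 : Int) "")
      (PySem.List.pyGetD c (0 : Int) "") with h0 | h0 | h0 <;>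
    rcases triLen (PySem.List.pyGetD a (1 : Int) "") (PySem.List.pyGetD b (1 : Int) "")
      (PySem.List.pyGetD c (1 : Int) "") with h1 | h1 | h1 <;>
    rcases triLen (PySem.List.pyGetD a (2 : Int) "") (PySem.List.pyGetD b (2 : Int) "")
      (PySem.List.pyGetD c (2 : Int) "") with h2 | h2 | h2 <;>
    rcases triLen (PySem.List.pyGetD a (3 : Int) "") (PySem.List.pyGetD b (3 : Int) "")
      (PySem.List.pyGetD c (3 : Int) "") with h3 | h3 | h3 <;>
    simp [h0, h1, h2, h3]

theorem rm2_eq_erase (l : List (List String)) (a b : List String) (hn : l.Nodup) :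
    rm2 l a b = (l.erase a).erase b := by
  have h1 : l.erase a = l.filter (fun x => x != a) := hn.erase_eq_filter a
  have h2 : (l.erase a).erase b = (l.erase a).filter (fun x => x != b) :=
    (hn.erase a).erase_eq_filter b
  rw [h2, h1, List.filter_filter]
  unfold rm2
  apply List.filter_congr
  intro x _
  simp only [bne]
  cases hxa : x == a <;> cases hxb : x == b <;> simp [hxa, hxb]

theorem length_rm2 (l : List (List String)) (a b : List String) (hn : l.Nodup)
    (hs : [a, b].Sublist l) : (rm2 l a b).length + 2 = l.length := by
  have hab : a ≠ b := by
    have := hs.nodup hn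
    simp at this
    exact this
  have ha : a ∈ l := hs.subset (by simp)
  have hb : b ∈ l := hs.subset (by simp)
  have hb' : b ∈ l.erase a := (List.mem_erase_of_ne (Ne.symm hab)).mpr hb
  rw [rm2_eq_erase l a b hn]
  have e1 : (l.erase a).length = l.length - 1 := List.length_erase_of_mem ha
  have e2 : ((l.erase a).erase b).length = (l.erase a).length - 1 :=
    List.length_erase_of_mem hb'
  have : 0 < l.length := List.length_pos_of_mem ha
  have : 0 < (l.erase a).length := List.length_pos_of_mem hb'
  omega

theorem length_rm3 (l : List (List String)) (t : List String × List String × List String)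
    (hn : l.Nodup) (hs : [t.1, t.2.1, t.2.2].Sublist l) :
    (rm3 l t).length + 3 = l.length := by
  obtain ⟨t1, t2, t3⟩ := t
  simp only at hs ⊢
  have hnd3 := hs.nodup hn
  simp [List.nodup_cons] at hnd3
  have h1 : t1 ∈ l := hs.subset (by simp)
  have h2 : t2 ∈ l := hs.subset (by simp)
  have h3 : t3 ∈ l := hs.subset (by simp)
  have heq : rm3 l (t1, t2, t3) = ((l.erase t1).erase t2).erase t3 := by
    have e1 : l.erase t1 = l.filter (fun x => x != t1) := hn.erase_eq_filter t1
    have e2 : (l.erase t1).erase t2 = (l.erase t1).filter (fun x => x != t2) :=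
      (hn.erase t1).erase_eq_filter t2
    have e3 : ((l.erase t1).erase t2).erase t3 =
        ((l.erase t1).erase t2).filter (fun x => x != t3) :=
      ((hn.erase t1).erase t2).erase_eq_filter t3
    rw [e3, e2, e1, List.filter_filter, List.filter_filter]
    unfold rm3
    apply List.filter_congr
    intro x _
    simp only [bne]
    cases hx1 : x == t1 <;> cases hx2 : x == t2 <;> cases hx3 : x == t3 <;>
      simp [hx1, hx2, hx3]
  rw [heq]
  have m2 : t2 ∈ l.erase t1 := (List.mem_erase_of_ne (Ne.symm hnd3.1.1)).mpr h2
  have m3 : t3 ∈ (l.erase t1).erase t2 := by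
    have : t3 ∈ l.erase t1 := (List.mem_erase_of_ne (Ne.symm hnd3.1.2)).mpr h3
    exact (List.mem_erase_of_ne (Ne.symm hnd3.2)).mpr this
  have e1 : (l.erase t1).length = l.length - 1 := List.length_erase_of_mem h1
  have e2 : ((l.erase t1).erase t2).length = (l.erase t1).length - 1 :=
    List.length_erase_of_mem m2
  have e3 : (((l.erase t1).erase t2).erase t3).length =
      ((l.erase t1).erase t2).length - 1 := List.length_erase_of_mem m3
  have : 0 < l.length := List.length_pos_of_mem h1
  have : 0 < (l.erase t1).length := List.length_pos_of_mem m2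
  have : 0 < ((l.erase t1).erase t2).length := List.length_pos_of_mem m3
  omega

theorem pack_len {l : List (List String)} {j : Nat} (hp : Pack l j) (hn : l.Nodup) :
    3 * j ≤ l.length := by
  induction hp with
  | zero => omega
  | step l t k hv hs hpk ih =>
    have hlen := length_rm3 l t hn hs
    have := ih (hn.filter _)
    omega

theorem pack_sublist {l1 l2 : List (List String)} {k : Nat} (hs : l1.Sublist l2)
    (hp : Pack l1 k) : Pack l2 k := by
  induction hp generalizing l2 with
  | zero => exact .zero _
  | step l t k hv hst hpk ih => exact .step _ t k hv (hst.trans hs) (ih (hs.filter _))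

theorem rm3_head (first a b : List String) (rest : List (List String))
    (hfr : first ∉ rest) : rm3 (first :: rest) (first, a, b) = rm2 rest a b := by
  unfold rm3 rm2
  rw [List.filter_cons]
  have hcond : (!(first == first || first == a || first == b)) = false := by simp
  rw [hcond]
  simp only [Bool.false_eq_true, if_false]
  apply List.filter_congr
  intro x hx
  have hne : (x == first) = false := by
    simp only [beq_eq_false_iff_ne]
    intro h
    exact hfr (h ▸ hx)
  rw [hne]
  simp

theorem pack_cases {first : List String} {rest : List (List String)} {j : Nat}
    (hn : (first :: rest).Nodup) (hp : Pack (first :: rest) j) :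
    Pack rest j ∨ ∃ a b j', j = j' + 1 ∧ validA (first, a, b) = true ∧
      [a, b].Sublist rest ∧ Pack (rm2 rest a b) j' := by
  revert hn hp
  induction j generalizing rest with
  | zero => intro _ _; exact Or.inl (.zero rest)
  | succ k ih =>
    intro hn hp
    cases hp with
    | step _ t _ hv hs hpk =>
      obtain ⟨t1, t2, t3⟩ := t
      simp only at hs hpk hv
      have hfr : first ∉ rest := (List.nodup_cons.mp hn).1
      have hnr : rest.Nodup := (List.nodup_cons.mp hn).2
      rcases List.sublist_cons_iff.mp hs with hsub | ⟨r, heq, hr⟩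
      · -- the first step's triple lies entirely in rest
        have m1 : t1 ∈ rest := hsub.subset (by simp)
        have m2 : t2 ∈ rest := hsub.subset (by simp)
        have m3 : t3 ∈ rest := hsub.subset (by simp)
        have hne1 : first ≠ t1 := by rintro rfl; exact hfr m1
        have hne2 : first ≠ t2 := by rintro rfl; exact hfr m2
        have hne3 : first ≠ t3 := by rintro rfl; exact hfr m3
        have hcons : rm3 (first :: rest) (t1, t2, t3) = first :: rm3 rest (t1, t2, t3) := by
          unfold rm3
          rw [List.filter_cons]
          have hc : (!(first == t1 || first == t2 || first == t3)) = true := by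
            simp [hne1, hne2, hne3]
          rw [hc]
          simp
        rw [hcons] at hpk
        have hn' : (first :: rm3 rest (t1, t2, t3)).Nodup := by
          refine List.nodup_cons.mpr ⟨?_, hnr.filter _⟩
          intro hmem
          exact hfr (List.mem_of_mem_filter hmem)
        rcases ih hn' hpk with hL | ⟨a, b, j', hjk, hva, hab, hp2⟩
        · exact Or.inl (.step rest (t1, t2, t3) k hv hsub hL)
        · right
          refine ⟨a, b, j' + 1, by omega, hva,
            hab.trans (List.filter_sublist : (rm3 rest (t1, t2, t3)).Sublist rest), ?_⟩
          have ha : a ∈ rm3 rest (t1, t2, t3) := hab.subset (by simp)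
          have hb : b ∈ rm3 rest (t1, t2, t3) := hab.subset (by simp)
          have hpa := (List.mem_filter.mp ha).2
          have hpb := (List.mem_filter.mp hb).2
          simp only [Bool.not_eq_eq_eq_not, Bool.not_true, Bool.or_eq_false_iff,
            beq_eq_false_iff_ne] at hpa hpb
          obtain ⟨⟨ha1, ha2⟩, ha3⟩ := hpa
          obtain ⟨⟨hb1, hb2⟩, hb3⟩ := hpb
          have hsub2 : [t1, t2, t3].Sublist (rm2 rest a b) := by
            have hfix : [t1, t2, t3].filter (fun x => !(x == a || x == b)) = [t1, t2, t3] := by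
              apply List.filter_eq_self.mpr
              intro x hx
              simp only [List.mem_cons, List.not_mem_nil, or_false] at hx
              rcases hx with rfl | rfl | rfl <;>
                simp [Ne.symm ha1, Ne.symm ha2, Ne.symm ha3,
                  Ne.symm hb1, Ne.symm hb2, Ne.symm hb3]
            have := hsub.filter (fun x => !(x == a || x == b))
            rw [hfix] at this
            exact this
          have hcomm : rm2 (rm3 rest (t1, t2, t3)) a b = rm3 (rm2 rest a b) (t1, t2, t3) := by
            unfold rm2 rm3
            rw [List.filter_filter, List.filter_filter]
            apply List.filter_congr
            intro x _
            exact Bool.and_comm _ _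
          rw [hcomm] at hp2
          exact .step _ (t1, t2, t3) j' hv hsub2 hp2
      · -- the first step's triple starts with `first`
        injection heq with h1 h2
        subst h2
        rw [h1] at hv hpk
        right
        refine ⟨t2, t3, k, rfl, hv, hr, ?_⟩
        rw [rm3_head first t2 t3 rest hfr] at hpk
        exact hpk

theorem goA_ge (ideal X : Int)
    (pset : PySem.Set (List String × List String × List String))
    (dfs : List (List String) → Int → Int) (left : List (List String))
    (ps : List (List String × List String × List String)) (n tm : Int)
    (hX : X ≤ ideal)
    (h : X ≤ tm ∨ ∃ t ∈ ps, pset.contains t = true ∧ X ≤ dfs (rm3 left t) (n + 1)) :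
    X ≤ goA ideal pset dfs left ps n tm := by
  induction ps generalizing tm with
  | nil =>
    rcases h with h | ⟨t, ht, _⟩
    · simpa [goA] using h
    · simp at ht
  | cons i ps ih =>
    simp only [goA]
    by_cases hc : pset.contains i = true
    · rw [if_pos hc]
      by_cases he : dfs (rm3 left i) (n + 1) = ideal
      · simp only [rm3] at he
        rw [if_pos he, he]
        exact hX
      · simp only [rm3] at he
        rw [if_neg he]
        apply ih
        rcases h with h | ⟨t, ht, hct, hd⟩
        · left
          split <;> omega
        · rcases List.mem_cons.mp ht with rfl | ht'
          · left
            simp only [rm3] at hd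
            split <;> omega
          · exact Or.inr ⟨t, ht', hct, hd⟩
    · rw [if_neg hc]
      apply ih
      rcases h with h | ⟨t, ht, hct, hd⟩
      · exact Or.inl h
      · rcases List.mem_cons.mp ht with rfl | ht'
        · exact absurd hct hc
        · exact Or.inr ⟨t, ht', hct, hd⟩

theorem goA_eq (ideal : Int)
    (pset : PySem.Set (List String × List String × List String))
    (dfs : List (List String) → Int → Int) (l : List (List String))
    (ps : List (List String × List String × List String)) (n tm : Int)
    (hps : ∀ t ∈ ps, t ∈ combos3 l)
    (hco : ∀ t, pset.contains t = true → validA t = true)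
    (hbest : ∃ k0 : Nat, tm = n + (k0 : Int) ∧ Pack l k0)
    (hdfs : ∀ t ∈ ps, pset.contains t = true →
      ∃ k' : Nat, dfs (rm3 l t) (n + 1) = n + 1 + (k' : Int) ∧ Pack (rm3 l t) k') :
    ∃ k : Nat, goA ideal pset dfs l ps n tm = n + (k : Int) ∧ Pack l k := by
  induction ps generalizing tm with
  | nil => simpa [goA] using hbest
  | cons i ps ih =>
    have ih' := fun tm hb => ih (fun t ht => hps t (List.mem_cons_of_mem _ ht))
      (tm := tm) hb (fun t ht hct => hdfs t (List.mem_cons_of_mem _ ht) hct)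
    simp only [goA]
    by_cases hc : pset.contains i = true
    · rw [if_pos hc]
      obtain ⟨k', hk', hp'⟩ := hdfs i (List.mem_cons_self ..) hc
      have hstep : Pack l (k' + 1) :=
        .step l i k' (hco i hc) ((mem_combos3 i.1 i.2.1 i.2.2 l).mp (hps i (List.mem_cons_self ..))) hp'
      simp only [rm3] at hk'
      by_cases he : dfs (l.filter (fun x => !(x == i.1 || x == i.2.1 || x == i.2.2))) (n + 1) = ideal
      · rw [if_pos he]
        exact ⟨k' + 1, by rw [hk']; push_cast; ring, hstep⟩
      · rw [if_neg he]
        apply ih'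
        obtain ⟨k0, hk0, hp0⟩ := hbest
        by_cases hgt : dfs (l.filter (fun x => !(x == i.1 || x == i.2.1 || x == i.2.2))) (n + 1) > tm
        · rw [if_pos hgt]
          exact ⟨k' + 1, by rw [hk']; push_cast; ring, hstep⟩
        · rw [if_neg hgt]
          exact ⟨k0, hk0, hp0⟩
    · rw [if_neg hc]
      exact ih' tm hbest

theorem goB_ge (ideal X : Int) (dfs : List (List String) → Int → Int)
    (rest : List (List String)) (first : List String)
    (ps : List (List String × List String)) (n best : Int)
    (hX : X ≤ ideal)
    (h : X ≤ best ∨ ∃ ab ∈ ps, okB first ab.1 ab.2 = true ∧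
      X ≤ dfs (rm2 rest ab.1 ab.2) (n + 1)) :
    X ≤ goB ideal dfs rest first ps n best := by
  induction ps generalizing best with
  | nil =>
    rcases h with h | ⟨t, ht, _⟩
    · simpa [goB] using h
    · simp at ht
  | cons ab ps ih =>
    obtain ⟨a, b⟩ := ab
    simp only [goB]
    by_cases hc : okB first a b = true
    · rw [if_pos hc]
      by_cases he : dfs (rm2 rest a b) (n + 1) = ideal
      · simp only [rm2] at he
        rw [if_pos he, he]
        exact hX
      · simp only [rm2] at he
        rw [if_neg he]
        apply ih
        rcases h with h | ⟨t, ht, hct, hd⟩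
        · left
          split <;> omega
        · rcases List.mem_cons.mp ht with rfl | ht'
          · left
            simp only [rm2] at hd
            split <;> omega
          · exact Or.inr ⟨t, ht', hct, hd⟩
    · rw [if_neg hc]
      apply ih
      rcases h with h | ⟨t, ht, hct, hd⟩
      · exact Or.inl h
      · rcases List.mem_cons.mp ht with rfl | ht'
        · exact absurd hct hc
        · exact Or.inr ⟨t, ht', hct, hd⟩

theorem goB_eq (ideal : Int) (dfs : List (List String) → Int → Int)
    (rest : List (List String)) (first : List String)
    (ps : List (List String × List String)) (n best : Int)
    (hbest : ∃ k0 : Nat, best = n + (k0 : Int) ∧ Pack (first :: rest) k0)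
    (hdfs : ∀ ab ∈ ps, okB first ab.1 ab.2 = true →
      ∃ k' : Nat, dfs (rm2 rest ab.1 ab.2) (n + 1) = n + 1 + (k' : Int) ∧
        Pack (first :: rest) (k' + 1)) :
    ∃ k : Nat, goB ideal dfs rest first ps n best = n + (k : Int) ∧ Pack (first :: rest) k := by
  induction ps generalizing best with
  | nil => simpa [goB] using hbest
  | cons ab ps ih =>
    have ih' := fun best hb => ih (best := best) hb
      (fun t ht hct => hdfs t (List.mem_cons_of_mem _ ht) hct)
    obtain ⟨a, b⟩ := ab
    simp only [goB]
    by_cases hc : okB first a b = true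
    · rw [if_pos hc]
      obtain ⟨k', hk', hp'⟩ := hdfs (a, b) (List.mem_cons_self ..) hc
      simp only [rm2] at hk'
      by_cases he : dfs (rest.filter (fun x => !(x == a || x == b))) (n + 1) = ideal
      · rw [if_pos he]
        exact ⟨k' + 1, by rw [hk']; push_cast; ring, hp'⟩
      · rw [if_neg he]
        apply ih'
        obtain ⟨k0, hk0, hp0⟩ := hbest
        by_cases hgt : dfs (rest.filter (fun x => !(x == a || x == b))) (n + 1) > best
        · rw [if_pos hgt]
          exact ⟨k' + 1, by rw [hk']; push_cast; ring, hp'⟩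
        · rw [if_neg hgt]
          exact ⟨k0, hk0, hp0⟩
    · rw [if_neg hc]
      exact ih' best hbest

theorem lemA (cards : List (List String)) (ideal : Int) :
    ∀ (fuel : Nat) (l : List (List String)) (n : Int),
      l.Nodup → l.Sublist cards → l.length ≤ fuel →
      n + ((l.length / 3 : Nat) : Int) ≤ ideal →
      (∃ k : Nat, dfsA ideal (psetOf cards) fuel l n = n + (k : Int) ∧ Pack l k) ∧
      (∀ j : Nat, Pack l j → n + (j : Int) ≤ dfsA ideal (psetOf cards) fuel l n) := by
  intro fuel
  induction fuel with
  | zero =>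
    intro l n hn _ _ _
    refine ⟨⟨0, by simp [dfsA], .zero l⟩, ?_⟩
    intro j hj
    have := pack_len hj hn
    have hl0 : l.length = 0 := by omega
    have hj0 : j = 0 := by omega
    subst hj0
    simp [dfsA]
  | succ fuel ih =>
    intro l n hn hsub hlen hinv
    by_cases h3 : l.length < 3
    · refine ⟨⟨0, by simp [dfsA, if_pos h3], .zero l⟩, ?_⟩
      intro j hj
      have := pack_len hj hn
      have hj0 : j = 0 := by omega
      subst hj0
      simp [dfsA, if_pos h3]
    · have hdfs : ∀ t ∈ combos3 l, (psetOf cards).contains t = true →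
          ∃ k' : Nat, dfsA ideal (psetOf cards) fuel (rm3 l t) (n + 1) = n + 1 + (k' : Int) ∧
            Pack (rm3 l t) k' := by
        intro t ht _
        have hsub3 : [t.1, t.2.1, t.2.2].Sublist l := (mem_combos3 t.1 t.2.1 t.2.2 l).mp ht
        have hlen3 := length_rm3 l t hn hsub3
        have harith : (rm3 l t).length / 3 + 1 = l.length / 3 := by omega
        obtain ⟨k', hk', hp'⟩ := (ih (rm3 l t) (n + 1) (hn.filter _)
          ((List.filter_sublist).trans hsub) (by omega) (by
            have hcast : ((l.length / 3 : Nat) : Int) = ((rm3 l t).length / 3 : Nat) + 1 := by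
              exact_mod_cast harith.symm
            rw [hcast] at hinv
            omega)).1
        exact ⟨k', by rw [hk'], hp'⟩
      have hmain := goA_eq ideal (psetOf cards)
        (fun l' m => dfsA ideal (psetOf cards) fuel l' m) l (combos3 l) n n
        (fun t ht => ht) (fun t hct => ((contains_psetOf cards t).mp hct).2)
        ⟨0, by simp, .zero l⟩ hdfs
      have hres_eq : dfsA ideal (psetOf cards) (fuel + 1) l n =
          goA ideal (psetOf cards) (fun l' m => dfsA ideal (psetOf cards) fuel l' m) l
            (combos3 l) n n := by
        simp only [dfsA]
        rw [if_neg h3]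
      refine ⟨by rw [hres_eq]; exact hmain, ?_⟩
      intro j hj
      rw [hres_eq]
      have hball := pack_len hj hn
      cases j with
      | zero =>
        obtain ⟨k, hk, _⟩ := hmain
        rw [hk]
        push_cast
        omega
      | succ j' =>
        have hXid : n + ((j' + 1 : Nat) : Int) ≤ ideal := by
          have hdiv : j' + 1 ≤ l.length / 3 := by omega
          have : ((j' + 1 : Nat) : Int) ≤ ((l.length / 3 : Nat) : Int) := by exact_mod_cast hdiv
          omega
        cases hj with
        | step _ t _ hv hs hpt =>
          apply goA_ge _ _ _ _ _ _ _ _ hXid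
          right
          refine ⟨t, (mem_combos3 t.1 t.2.1 t.2.2 l).mpr hs,
            (contains_psetOf cards t).mpr ⟨(mem_combos3 t.1 t.2.1 t.2.2 cards).mpr
              (hs.trans hsub), hv⟩, ?_⟩
          have hlen3 := length_rm3 l t hn hs
          have harith : (rm3 l t).length / 3 + 1 = l.length / 3 := by omega
          have h2 := (ih (rm3 l t) (n + 1) (hn.filter _) ((List.filter_sublist).trans hsub)
            (by omega) (by
              have hcast : ((l.length / 3 : Nat) : Int) = ((rm3 l t).length / 3 : Nat) + 1 := by
                exact_mod_cast harith.symm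
              rw [hcast] at hinv
              omega)).2 j' hpt
          calc n + ((j' + 1 : Nat) : Int) = n + 1 + (j' : Int) := by push_cast; ring
            _ ≤ _ := h2

theorem lemB (ideal : Int) :
    ∀ (fuel : Nat) (l : List (List String)) (n : Int),
      l.Nodup → l.length ≤ fuel →
      n + ((l.length / 3 : Nat) : Int) ≤ ideal →
      (∃ k : Nat, dfsB ideal fuel l n = n + (k : Int) ∧ Pack l k) ∧
      (∀ j : Nat, Pack l j → n + (j : Int) ≤ dfsB ideal fuel l n) := by
  intro fuel
  induction fuel with
  | zero =>
    intro l n hn _ _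
    refine ⟨⟨0, by simp [dfsB], .zero l⟩, ?_⟩
    intro j hj
    have := pack_len hj hn
    have hj0 : j = 0 := by omega
    subst hj0
    simp [dfsB]
  | succ fuel ih =>
    intro l n hn hlen hinv
    by_cases h3 : l.length < 3
    · refine ⟨⟨0, by simp [dfsB, if_pos h3], .zero l⟩, ?_⟩
      intro j hj
      have := pack_len hj hn
      have hj0 : j = 0 := by omega
      subst hj0
      simp [dfsB, if_pos h3]
    · cases l with
      | nil => exact absurd (by simp) h3
      | cons first rest =>
        have hfr : first ∉ rest := (List.nodup_cons.mp hn).1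
        have hnr : rest.Nodup := (List.nodup_cons.mp hn).2
        have hlenc : (first :: rest).length = rest.length + 1 := by simp
        have hinvR : n + ((rest.length / 3 : Nat) : Int) ≤ ideal := by
          have hdiv : rest.length / 3 ≤ (first :: rest).length / 3 := by
            rw [hlenc]; omega
          have : ((rest.length / 3 : Nat) : Int) ≤ (((first :: rest).length / 3 : Nat) : Int) := by
            exact_mod_cast hdiv
          omega
        have ihR := ih rest n hnr (by rw [hlenc] at hlen; omega) hinvR
        obtain ⟨kb, hkb, hpb⟩ := ihR.1
        have hpb' : Pack (first :: rest) kb := pack_sublist (List.sublist_cons_self first rest) hpb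
        by_cases hbi : dfsB ideal fuel rest n = ideal
        · have hres_eq : dfsB ideal (fuel + 1) (first :: rest) n = dfsB ideal fuel rest n := by
            simp only [dfsB]
            rw [if_neg h3, if_pos hbi]
          refine ⟨by rw [hres_eq]; exact ⟨kb, hkb, hpb'⟩, ?_⟩
          intro j hj
          rw [hres_eq, hbi]
          have hball := pack_len hj hn
          have hdiv : j ≤ (first :: rest).length / 3 := by omega
          have : (j : Int) ≤ (((first :: rest).length / 3 : Nat) : Int) := by exact_mod_cast hdiv
          omega
        · have hres_eq : dfsB ideal (fuel + 1) (first :: rest) n =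
              goB ideal (fun l' m => dfsB ideal fuel l' m) rest first (combos2 rest) n
                (dfsB ideal fuel rest n) := by
            simp only [dfsB]
            rw [if_neg h3, if_neg hbi]
          have harith2 : ∀ (ab : List String × List String), [ab.1, ab.2].Sublist rest →
              (rm2 rest ab.1 ab.2).length ≤ fuel ∧
              n + 1 + (((rm2 rest ab.1 ab.2).length / 3 : Nat) : Int) ≤ ideal := by
            intro ab hsub2
            have hlen2 := length_rm2 rest ab.1 ab.2 hnr hsub2
            have hfl : rest.length ≤ fuel := by rw [hlenc] at hlen; omega
            constructor
            · omega
            · have hd : (rm2 rest ab.1 ab.2).length / 3 + 1 = (first :: rest).length / 3 := by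
                rw [hlenc]; omega
              have hcast : (((first :: rest).length / 3 : Nat) : Int) =
                  ((rm2 rest ab.1 ab.2).length / 3 : Nat) + 1 := by
                exact_mod_cast hd.symm
              rw [hcast] at hinv
              omega
          have hdfs : ∀ ab ∈ combos2 rest, okB first ab.1 ab.2 = true →
              ∃ k' : Nat, dfsB ideal fuel (rm2 rest ab.1 ab.2) (n + 1) = n + 1 + (k' : Int) ∧
                Pack (first :: rest) (k' + 1) := by
            intro ab hab hok
            have hsub2 : [ab.1, ab.2].Sublist rest := (mem_combos2 ab.1 ab.2 rest).mp hab
            obtain ⟨hf2, hi2⟩ := harith2 ab hsub2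
            obtain ⟨k', hk', hp'⟩ := (ih (rm2 rest ab.1 ab.2) (n + 1) (hnr.filter _) hf2 hi2).1
            refine ⟨k', by rw [hk'], ?_⟩
            have hv : validA (first, ab.1, ab.2) = true := by rw [← okB_eq_validA]; exact hok
            refine Pack.step _ (first, ab.1, ab.2) k' hv (hsub2.cons₂ first) ?_
            rw [rm3_head first ab.1 ab.2 rest hfr]
            exact hp'
          have hmain := goB_eq ideal (fun l' m => dfsB ideal fuel l' m) rest first
            (combos2 rest) n (dfsB ideal fuel rest n) ⟨kb, hkb, hpb'⟩ hdfs
          refine ⟨by rw [hres_eq]; exact hmain, ?_⟩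
          intro j hj
          rw [hres_eq]
          have hball := pack_len hj hn
          have hXid : n + (j : Int) ≤ ideal := by
            have hdiv : j ≤ (first :: rest).length / 3 := by omega
            have : (j : Int) ≤ (((first :: rest).length / 3 : Nat) : Int) := by exact_mod_cast hdiv
            omega
          rcases pack_cases hn hj with hR | ⟨a, b, j', rfl, hva, hab2, hp2⟩
          · exact goB_ge _ _ _ _ _ _ _ _ hXid (Or.inl (ihR.2 j hR))
          · apply goB_ge _ _ _ _ _ _ _ _ hXid
            right
            refine ⟨(a, b), (mem_combos2 a b rest).mpr hab2, ?_, ?_⟩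
            · rw [okB_eq_validA]; exact hva
            · obtain ⟨hf2, hi2⟩ := harith2 (a, b) hab2
              have h2 := (ih (rm2 rest a b) (n + 1) (hnr.filter _) hf2 hi2).2 j' hp2
              calc n + ((j' + 1 : Nat) : Int) = n + 1 + (j' : Int) := by push_cast; ring
                _ ≤ _ := h2

-- ===== VERDICT (by name: the statement is the Claim_ definition above) =====
theorem solution_spec : Claim_equal_solution := by
  intro cards _ hpre
  unfold Spec_solution
  rcases hpre with hlt | ⟨hnd, _⟩
  · -- fewer than 3 cards: both dfs return n = 0 at once
    match cards with
    | [] => simp [solution, solution_alt, dfsA, dfsB]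
    | [a] => simp [solution, solution_alt, dfsA, dfsB]
    | [a, b] => simp [solution, solution_alt, dfsA, dfsB]
    | a :: b :: c :: t => simp at hlt; omega
  · -- no duplicate cards: both sides compute 0 + (maximal packing size)
    show solution cards = solution_alt cards
    have hid : PySem.Int.floordiv (cards.length : Int) 3 = ((cards.length / 3 : Nat) : Int) := by
      exact_mod_cast PySem.Int.floordiv_natCast cards.length 3
    have hinv : (0 : Int) + ((cards.length / 3 : Nat) : Int) ≤
        PySem.Int.floordiv (cards.length : Int) 3 := by rw [hid]; omega
    have hA := lemA cards (PySem.Int.floordiv (cards.length : Int) 3) cards.length cards 0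
      hnd (List.Sublist.refl _) le_rfl hinv
    have hB := lemB (PySem.Int.floordiv (cards.length : Int) 3) cards.length cards 0
      hnd le_rfl hinv
    obtain ⟨kA, hkA, pA⟩ := hA.1
    obtain ⟨kB, hkB, pB⟩ := hB.1
    have h1 := hB.2 kA pA
    have h2 := hA.2 kB pB
    have eA : solution cards = dfsA (PySem.Int.floordiv (cards.length : Int) 3)
        (psetOf cards) cards.length cards 0 := rfl
    have eB : solution_alt cards =
        dfsB (PySem.Int.floordiv (cards.length : Int) 3) cards.length cards 0 := rfl
    rw [hkA] at h2
    rw [hkB] at h1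
    rw [eA, eB, hkA, hkB]
    omega
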